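-- pv_equiv track=rewrite | github.com/cevirici/woodcutter | src/display.py | render_axis_labels
-- ===== SOURCE A (Python) =====
-- def render_axis_labels(turnOwners):
--     axisLabels = ['||']
--     t = 0
--     for turn in range(1, len(turnOwners)):
--         if turnOwners[turn] == 0 and turnOwners[turn-1] != 0:
--             t += 1
--         axisLabels.append(str(t)+'<br>'+'abcdef'[turnOwners[turn]])
--
--     return axisLabels
-- ===== SOURCE B (Python) =====
-- def render_axis_labels(turnOwners):
--     # Stateless: the count shown at index i is a closed-form function of the
--     # prefix (number of nonzero->zero transitions up to i), no running state.
--     def trans(i):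
--         return sum(1 for j in range(1, i + 1)
--                    if turnOwners[j] == 0 and turnOwners[j - 1] != 0)
--     return ['||'] + [str(trans(i)) + '<br>' + 'abcdef'[turnOwners[i]]
--                      for i in range(1, len(turnOwners))]
-- ===== Notes on version B (the rewrite author's own statement) =====
-- stated objective: alternative
-- what changed: A's single stateful loop with a running counter is replaced by a stateless formulation: the count at each index is recomputed as a closed-form prefix count of nonzero-to-zero transitions, and the labels are produced by one index comprehension with no carried state (O(n^2) recount vs A's O(n) accumulator).
import Mathlib
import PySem

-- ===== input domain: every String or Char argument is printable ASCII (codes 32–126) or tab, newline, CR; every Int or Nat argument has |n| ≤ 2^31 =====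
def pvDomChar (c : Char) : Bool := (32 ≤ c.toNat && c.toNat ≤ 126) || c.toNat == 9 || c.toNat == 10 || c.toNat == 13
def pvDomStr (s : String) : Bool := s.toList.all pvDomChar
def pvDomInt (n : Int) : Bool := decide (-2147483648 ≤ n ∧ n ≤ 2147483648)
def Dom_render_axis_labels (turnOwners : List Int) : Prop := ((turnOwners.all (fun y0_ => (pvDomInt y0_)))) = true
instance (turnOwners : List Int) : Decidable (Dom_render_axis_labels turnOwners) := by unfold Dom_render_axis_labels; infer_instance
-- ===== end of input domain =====

-- B replaces A's stateful running-counter loop by a stateless index comprehension whose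
-- count is recomputed per index as a closed-form prefix count; objective: alternative.

-- ===== PORT A =====
def render_axis_labels (turnOwners : List Int) : List String :=
  ((PySem.List.pyRange 1 (turnOwners.length : Int) 1).foldl
    (fun (st : List String × Int) (turn : Int) =>
      let t : Int :=
        if PySem.List.pyGetD turnOwners turn 0 = 0 ∧ PySem.List.pyGetD turnOwners (turn - 1) 0 ≠ 0
        then st.2 + 1 else st.2
      (st.1 ++ [PySem.Int.toStr t ++ "<br>" ++
        ((PySem.Str.pyGet? "abcdef" (PySem.List.pyGetD turnOwners turn 0)).getD ' ').toString], t))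
    (["||"], 0)).1

-- ===== PORT B =====
-- port of Source B's inner 'trans(i)': sum of 1 over j in range(1, i+1) with the transition test
def altTrans (turnOwners : List Int) (i : Int) : Int :=
  (PySem.List.pyRange 1 (i + 1) 1).foldl
    (fun (acc : Int) (j : Int) =>
      if PySem.List.pyGetD turnOwners j 0 = 0 ∧ PySem.List.pyGetD turnOwners (j - 1) 0 ≠ 0
      then acc + 1 else acc) 0

def render_axis_labels_alt (turnOwners : List Int) : List String :=
  ["||"] ++ (PySem.List.pyRange 1 (turnOwners.length : Int) 1).map
    (fun i => PySem.Int.toStr (altTrans turnOwners i) ++ "<br>" ++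
      ((PySem.Str.pyGet? "abcdef" (PySem.List.pyGetD turnOwners i 0)).getD ' ').toString)

-- ===== PRECONDITION & SPEC =====
-- Pre_ excludes exactly the inputs on which Python A raises IndexError:
-- some owner after the first element is at least 6 or at most -7, so 'abcdef'[owner] is out of range.
def Pre_render_axis_labels (turnOwners : List Int) : Prop :=
  ∀ x ∈ turnOwners.tail, -6 ≤ x ∧ x ≤ 5
instance (turnOwners : List Int) : Decidable (Pre_render_axis_labels turnOwners) := by
  unfold Pre_render_axis_labels; infer_instance
def pvWitness_render_axis_labels : List Int := [7, 1, 0, 2, 0]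

def Spec_render_axis_labels (turnOwners : List Int) (out : List String) : Prop := out = render_axis_labels_alt turnOwners
instance (turnOwners : List Int) (out : List String) : Decidable (Spec_render_axis_labels turnOwners out) := by unfold Spec_render_axis_labels; infer_instance

-- ===== CLAIM (what is proved, stated in full; the proofs are below) =====
def Claim_equal_render_axis_labels : Prop := ∀ (turnOwners : List Int), Dom_render_axis_labels turnOwners → Pre_render_axis_labels turnOwners → Spec_render_axis_labels turnOwners (render_axis_labels turnOwners)

-- ===== LEMMAS AND PROOFS =====

-- the prefix count extends by one step at index k
lemma altTrans_succ (xs : List Int) (k : Nat) (hk : 1 ≤ k) :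
    altTrans xs (k : Int) =
      (if PySem.List.pyGetD xs (k : Int) 0 = 0 ∧ PySem.List.pyGetD xs ((k : Int) - 1) 0 ≠ 0
       then altTrans xs ((k : Int) - 1) + 1 else altTrans xs ((k : Int) - 1)) := by
  unfold altTrans
  rw [PySem.List.pyRange_one_succ_right (by exact_mod_cast hk),
      List.foldl_append]
  have h1 : (k : Int) - 1 + 1 = (k : Int) := by ring
  rw [h1]
  simp

-- invariant: A's loop from turn k, carrying the prefix count up to k-1,
-- appends exactly B's labels for the indices k … n-1
lemma pvMain (xs : List Int) (k : Nat) (hk : 1 ≤ k) (acc : List String) :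
    ((PySem.List.pyRange (k : Int) (xs.length : Int) 1).foldl
      (fun (st : List String × Int) (turn : Int) =>
        let t : Int :=
          if PySem.List.pyGetD xs turn 0 = 0 ∧ PySem.List.pyGetD xs (turn - 1) 0 ≠ 0
          then st.2 + 1 else st.2
        (st.1 ++ [PySem.Int.toStr t ++ "<br>" ++
          ((PySem.Str.pyGet? "abcdef" (PySem.List.pyGetD xs turn 0)).getD ' ').toString], t))
      (acc, altTrans xs ((k : Int) - 1))).1
    = acc ++ (PySem.List.pyRange (k : Int) (xs.length : Int) 1).map
        (fun i => PySem.Int.toStr (altTrans xs i) ++ "<br>" ++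
          ((PySem.Str.pyGet? "abcdef" (PySem.List.pyGetD xs i 0)).getD ' ').toString) := by
  by_cases hlt : k < xs.length
  · have hrec : xs.length - (k + 1) < xs.length - k := by omega
    rw [PySem.List.pyRange_one_cons (by exact_mod_cast hlt)]
    simp only [List.foldl_cons, List.map_cons]
    rw [← altTrans_succ xs k hk]
    have hnext : (k : Int) + 1 - 1 = (k : Int) := by ring
    have := pvMain xs (k + 1) (by omega)
      (acc ++ [PySem.Int.toStr (altTrans xs (k : Int)) ++ "<br>" ++
        ((PySem.Str.pyGet? "abcdef" (PySem.List.pyGetD xs (k : Int) 0)).getD ' ').toString])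
    push_cast at this
    rw [hnext] at this
    rw [this]
    simp
  · rw [PySem.List.pyRange_one_eq_nil (by exact_mod_cast Nat.not_lt.mp hlt)]
    simp
termination_by xs.length - k
decreasing_by omega

-- ===== VERDICT (by name: the statement is the Claim_ definition above) =====
theorem render_axis_labels_spec : Claim_equal_render_axis_labels := by
  intro xs _ _
  unfold Spec_render_axis_labels render_axis_labels render_axis_labels_alt
  have h0 : altTrans xs 0 = 0 := by
    unfold altTrans
    rw [PySem.List.pyRange_one_eq_nil (by norm_num)]
    rfl
  have := pvMain xs 1 (le_refl 1) ["||"]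
  norm_num at this
  rw [h0] at this
  exact this
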